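-- pv_equiv track=rewrite | github.com/MahboobMMonza/DMOJSolutions | Renaming_Script/duplicate_remover.py | dict_filter
-- ===== SOURCE A (Python) =====
-- def dict_filter(subs: dict):
--     problem_ids = {}
--     for i, sub in enumerate(subs):
--         problem_name = subs[sub]['problem']
--         if problem_name in problem_ids:
--             problem_ids[problem_name].append(sub)
--         else:
--             problem_ids[problem_name] = [sub]
--     return {k: v for k, v in problem_ids.items() if len(v) > 1}
-- ===== SOURCE B (Python) =====
-- def dict_filter(subs: dict):
--     # tally first: how many submissions share each problem name
--     counts = {}
--     for sub in subs:
--         name = subs[sub]['problem']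
--         counts[name] = counts.get(name, 0) + 1
--     # then collect only the duplicated ones, in the same order
--     result = {}
--     for sub in subs:
--         name = subs[sub]['problem']
--         if counts[name] > 1:
--             result.setdefault(name, []).append(sub)
--     return result
-- ===== Notes on version B (the rewrite author's own statement) =====
-- stated objective: alternative
-- what changed: A builds a full name-to-submissions grouping and then discards the singleton groups with a final dict-comprehension filter; B first tallies a count per problem name in one pass and then, in a second pass over subs, collects a submission into the result only when its name's count exceeds 1, so no filtering step and no singleton groups are ever built.
import Mathlib
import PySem

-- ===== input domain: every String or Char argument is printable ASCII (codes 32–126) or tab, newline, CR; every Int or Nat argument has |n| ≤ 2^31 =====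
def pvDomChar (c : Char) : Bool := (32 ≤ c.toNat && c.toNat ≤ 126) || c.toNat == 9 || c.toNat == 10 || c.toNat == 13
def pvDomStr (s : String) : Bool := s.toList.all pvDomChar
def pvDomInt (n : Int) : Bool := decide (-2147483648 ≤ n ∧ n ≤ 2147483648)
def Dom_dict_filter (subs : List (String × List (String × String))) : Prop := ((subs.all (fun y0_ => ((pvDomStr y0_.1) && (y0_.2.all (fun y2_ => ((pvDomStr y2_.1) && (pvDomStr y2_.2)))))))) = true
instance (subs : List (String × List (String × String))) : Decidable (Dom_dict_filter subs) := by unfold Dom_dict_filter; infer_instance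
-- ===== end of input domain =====

-- B re-decomposes A: instead of grouping everything and then filtering out singleton
-- groups, B tallies a per-name count first and collects only duplicated submissions
-- in a second pass (objective: alternative decomposition, same asymptotic cost).

-- subs[sub]['problem'] (both Pythons compute it the same way); "" is never read under Pre_
def pvName (p : String × List (String × String)) : String :=
  (PySem.Dict.mk p.2).getD "problem" ""

-- ===== PORT A =====
def dict_filter (subs : List (String × List (String × String))) : List (String × List String) :=
  let problem_ids := subs.foldl (fun d sub =>
      let problem_name := pvName sub
      if d.contains problem_name then
        d.modify problem_name [] (fun v => v ++ [sub.1])   -- problem_ids[problem_name].append(sub)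
      else
        d.insert problem_name [sub.1]) PySem.Dict.empty
  problem_ids.items.filter (fun kv => decide (1 < kv.2.length))

-- ===== PORT B =====
def dict_filter_alt (subs : List (String × List (String × String))) : List (String × List String) :=
  let counts := subs.foldl (fun c sub =>
      let name := pvName sub
      c.insert name (c.getD name 0 + 1))
      (PySem.Dict.empty : PySem.Dict String Int)              -- counts[name] = counts.get(name, 0) + 1
  let result := subs.foldl (fun r sub =>
      let name := pvName sub
      if counts.getD name 0 > 1 then                          -- counts[name] > 1 (name is always present)
        r.modify name [] (fun v => v ++ [sub.1])              -- result.setdefault(name, []).append(sub)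
      else r) PySem.Dict.empty
  result.items

-- ===== PRECONDITION & SPEC =====
-- Pre_ excludes exactly the dicts in which some submission's record lacks the key
-- "problem": there subs[sub]['problem'] raises KeyError (in A and in B alike).
def Pre_dict_filter (subs : List (String × List (String × String))) : Prop :=
  ∀ p ∈ subs, (PySem.Dict.mk p.2).contains "problem" = true
instance (subs : List (String × List (String × String))) : Decidable (Pre_dict_filter subs) := by unfold Pre_dict_filter; infer_instance
def pvWitness_dict_filter : (List (String × List (String × String))) :=
  [("s1", [("problem", "a")]), ("s2", [("problem", "a")]), ("s3", [("problem", "b")])]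
def Spec_dict_filter (subs : List (String × List (String × String))) (out : List (String × List String)) : Prop := out = dict_filter_alt subs
instance (subs : List (String × List (String × String))) (out : List (String × List String)) : Decidable (Spec_dict_filter subs out) := by unfold Spec_dict_filter; infer_instance

-- ===== CLAIM (what is proved, stated in full; the proofs are below) =====
def Claim_equal_dict_filter : Prop := ∀ (subs : List (String × List (String × String))), Dom_dict_filter subs → Pre_dict_filter subs → Spec_dict_filter subs (dict_filter subs)

-- ===== LEMMAS AND PROOFS =====

-- the grouping loop both programs share, abstracted over the list it runs on
def pvGroup (l : List (String × List (String × String))) : PySem.Dict String (List String) :=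
  l.foldl (fun d p => d.modify (pvName p) [] (fun v => v ++ [p.1])) PySem.Dict.empty

-- names whose submission count in subs exceeds 1 (B's collection condition)
def pvDup (subs : List (String × List (String × String)))
    (p : String × List (String × String)) : Bool :=
  decide (1 < (subs.map pvName).count (pvName p))

-- A's if/else branch pair is a single dict.modify step
theorem pv_stepA (d : PySem.Dict String (List String)) (n s : String) :
    (if d.contains n then d.modify n [] (fun v => v ++ [s]) else d.insert n [s])
      = d.modify n [] (fun v => v ++ [s]) := by
  by_cases h : d.contains n = true
  · simp [h]
  · simp at h
    simp [h, PySem.Dict.insert, PySem.Dict.modify, PySem.Dict.getD_of_not_contains d ([] : List String) h]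

theorem pv_groupA (subs : List (String × List (String × String))) :
    (subs.foldl (fun d sub =>
      let problem_name := pvName sub
      if d.contains problem_name then d.modify problem_name [] (fun v => v ++ [sub.1])
      else d.insert problem_name [sub.1]) PySem.Dict.empty) = pvGroup subs := by
  unfold pvGroup
  congr 1
  funext d sub
  exact pv_stepA d (pvName sub) sub.1

theorem pv_group_eq_map (l : List (String × List (String × String))) :
    pvGroup l = (l.map (fun p => (pvName p, p.1))).foldl
      (fun d q => d.modify q.1 [] (fun v => v ++ [q.2])) PySem.Dict.empty := by
  rw [List.foldl_map]; rfl

-- closed form of the grouping loop's items: keys in first-appearance order, all matching subs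
theorem pv_items_group (l : List (String × List (String × String))) :
    (pvGroup l).items
      = (PySem.Set.ofList (l.map pvName)).map
          (fun k => (k, (l.filter (fun p => pvName p == k)).map (fun p => p.1))) := by
  have hnd : (pvGroup l).keys.Nodup := by
    apply PySem.Dict.nodup_keys_foldl_modify_key
    simp [PySem.Dict.keys_empty]
  have hkeys : (pvGroup l).keys = PySem.Set.ofList (l.map pvName) := by
    unfold pvGroup
    rw [PySem.Dict.keys_foldl_modify_key l pvName ([] : List String)
      (fun _ p v => v ++ [p.1]) PySem.Dict.empty]
    simp [PySem.Dict.keys_empty, PySem.Set.ofList, PySem.Set.update]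
  have hget : ∀ k, (pvGroup l).getD k []
      = (l.filter (fun p => pvName p == k)).map (fun p => p.1) := by
    intro k
    rw [pv_group_eq_map, PySem.Dict.getD_foldl_modify_append]
    simp [List.filter_map, Function.comp_def]
  rw [PySem.Dict.items_eq_map_keys (pvGroup l) hnd ([] : List String), hkeys]
  exact List.map_congr_left (fun k _ => by rw [hget k])

-- B's count table reads off the multiplicity of a name in subs
theorem pv_counts (subs : List (String × List (String × String))) (n : String) :
    (subs.foldl (fun c sub => c.insert (pvName sub) (c.getD (pvName sub) 0 + 1))
        PySem.Dict.empty).getD n 0 = ((subs.map pvName).count n : Int) := by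
  have h := List.foldl_map (f := pvName)
    (g := fun (c : PySem.Dict String Int) x => c.insert x (c.getD x 0 + 1))
    (l := subs) (init := PySem.Dict.empty)
  rw [← h, PySem.Dict.getD_foldl_insert_add_one]
  simp [PySem.Dict.getD_empty]

-- a fold that skips the elements failing p is the fold over the filtered list
theorem pv_foldl_if_filter {α σ : Type} (g : σ → α → σ) (p : α → Bool) :
    ∀ (l : List α) (s : σ),
      l.foldl (fun s x => if p x then g s x else s) s = (l.filter p).foldl g s := by
  intro l
  induction l with
  | nil => intro s; rfl
  | cons x l ih =>
      intro s
      by_cases h : p x = true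
      · simp [h, ih]
      · simp at h; simp [h, ih]

-- first-occurrence dedup commutes with filter
theorem pv_update_filter {α : Type} [BEq α] [LawfulBEq α] (p : α → Bool) :
    ∀ (l : List α) (s : List α),
      (PySem.Set.update s l).filter p = PySem.Set.update (s.filter p) (l.filter p) := by
  intro l
  induction l with
  | nil => intro s; rfl
  | cons x l ih =>
      intro s
      have hstep : (PySem.Set.add s x).filter p
          = if p x then PySem.Set.add (s.filter p) x else s.filter p := by
        by_cases hc : x ∈ s <;> by_cases hp : p x = true <;>
          simp [PySem.Set.add, hc, hp, List.mem_filter]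
      show (PySem.Set.update (PySem.Set.add s x) l).filter p = _
      rw [ih (PySem.Set.add s x), hstep]
      by_cases hp : p x = true
      · simp [hp, PySem.Set.update]
      · simp at hp; simp [hp, PySem.Set.update]

theorem pv_ofList_filter {α : Type} [BEq α] [LawfulBEq α] (p : α → Bool) (l : List α) :
    (PySem.Set.ofList l).filter p = PySem.Set.ofList (l.filter p) := by
  have h := pv_update_filter p l []
  simpa [PySem.Set.ofList, PySem.Set.update] using h

-- B computes the grouping of exactly the duplicated submissions
theorem pv_altB (subs : List (String × List (String × String))) :
    dict_filter_alt subs = (pvGroup (subs.filter (pvDup subs))).items := by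
  have hstep : (fun (r : PySem.Dict String (List String)) sub =>
        if (subs.foldl (fun c sub => c.insert (pvName sub) (c.getD (pvName sub) 0 + 1))
            (PySem.Dict.empty : PySem.Dict String Int)).getD (pvName sub) 0 > 1
        then r.modify (pvName sub) [] (fun v => v ++ [sub.1]) else r)
      = (fun r sub => if pvDup subs sub then r.modify (pvName sub) [] (fun v => v ++ [sub.1]) else r) := by
    funext r sub
    rw [pv_counts]
    by_cases h : pvDup subs sub = true
    · have h' : (1 : Int) < ((subs.map pvName).count (pvName sub) : Int) := by
        simp [pvDup] at h; exact_mod_cast h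
      simp [h, h']
    · simp only [Bool.not_eq_true] at h
      have h' : ¬ (1 : Int) < ((subs.map pvName).count (pvName sub) : Int) := by
        simp [pvDup] at h; exact_mod_cast Nat.not_lt.mpr h
      simp [h, h']
  show (subs.foldl (fun r sub =>
        if (subs.foldl (fun c sub => c.insert (pvName sub) (c.getD (pvName sub) 0 + 1))
            (PySem.Dict.empty : PySem.Dict String Int)).getD (pvName sub) 0 > 1
        then r.modify (pvName sub) [] (fun v => v ++ [sub.1]) else r) PySem.Dict.empty).items
      = (pvGroup (subs.filter (pvDup subs))).items
  rw [hstep, pv_foldl_if_filter]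
  rfl

theorem pv_main (subs : List (String × List (String × String))) :
    dict_filter subs = dict_filter_alt subs := by
  rw [pv_altB]
  show ((subs.foldl (fun d sub =>
      let problem_name := pvName sub
      if d.contains problem_name then d.modify problem_name [] (fun v => v ++ [sub.1])
      else d.insert problem_name [sub.1]) PySem.Dict.empty).items.filter
        (fun kv => decide (1 < kv.2.length)))
    = (pvGroup (subs.filter (pvDup subs))).items
  rw [pv_groupA, pv_items_group, pv_items_group, List.filter_map]
  have hlen : ∀ k : String,
      ((subs.filter (fun p => pvName p == k)).map (fun p => p.1)).length
        = (subs.map pvName).count k := by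
    intro k
    rw [List.length_map, ← List.countP_eq_length_filter, List.count, List.countP_map]
    rfl
  have hmapfilter : (subs.filter (pvDup subs)).map pvName
      = (subs.map pvName).filter (fun n => decide (1 < (subs.map pvName).count n)) := by
    rw [List.filter_map]
    rfl
  have hkeys : ((PySem.Set.ofList (subs.map pvName)).filter
        ((fun kv => decide (1 < kv.2.length)) ∘
          (fun k => (k, (subs.filter (fun p => pvName p == k)).map (fun p => p.1)))))
      = PySem.Set.ofList ((subs.filter (pvDup subs)).map pvName) := by
    rw [hmapfilter, ← pv_ofList_filter]
    apply List.filter_congr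
    intro k _
    simp [Function.comp, hlen k]
  rw [hkeys]
  apply List.map_congr_left
  intro k hk
  have hk1 : k ∈ (subs.filter (pvDup subs)).map pvName := (PySem.Set.mem_ofList _ k).mp hk
  have hqk : 1 < (subs.map pvName).count k := by
    rcases List.mem_map.mp hk1 with ⟨p, hp, hpk⟩
    have h2 := (List.mem_filter.mp hp).2
    simp [pvDup] at h2
    rwa [hpk] at h2
  have hvals : (subs.filter (pvDup subs)).filter (fun p => pvName p == k)
      = subs.filter (fun p => pvName p == k) := by
    rw [List.filter_filter]
    apply List.filter_congr
    intro p _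
    by_cases h : pvName p = k
    · simp [pvDup, h, hqk]
    · simp [h]
  rw [hvals]

-- ===== VERDICT (by name: the statement is the Claim_ definition above) =====
theorem dict_filter_spec : Claim_equal_dict_filter := by
  intro subs _ _
  unfold Spec_dict_filter
  exact pv_main subs
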